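-- pv_equiv track=rewrite | github.com/entropyisrude/nba-luck-adjustment | generate_possessions_from_pbp.py | _infer_home_away_from_actions
-- ===== SOURCE A (Python) =====
-- def _infer_home_away_from_actions(actions: list[dict]) -> tuple[int, int]:
--     home_votes: dict[int, int] = {}
--     away_votes: dict[int, int] = {}
--     prev_home = None
--     prev_away = None
--     for a in actions:
--         try:
--             team_id = int(a.get("teamId", 0) or 0)
--         except Exception:
--             team_id = 0
--         if team_id <= 0:
--             continue
--         try:
--             score_home = int(a.get("scoreHome", 0) or 0)
--             score_away = int(a.get("scoreAway", 0) or 0)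
--         except Exception:
--             continue
--         if prev_home is not None and prev_away is not None:
--             if score_home > prev_home and score_away == prev_away:
--                 home_votes[team_id] = home_votes.get(team_id, 0) + 1
--             elif score_away > prev_away and score_home == prev_home:
--                 away_votes[team_id] = away_votes.get(team_id, 0) + 1
--         prev_home, prev_away = score_home, score_away
--
--     if home_votes and away_votes:
--         home_id = max(home_votes, key=home_votes.get)
--         away_id = max(away_votes, key=away_votes.get)
--         if home_id != away_id:
--             return int(home_id), int(away_id)
--     return 0, 0
-- ===== SOURCE B (Python) =====
-- def _clean_row(a):
--     try:
--         team_id = int(a.get("teamId", 0) or 0)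
--     except Exception:
--         return None
--     if team_id <= 0:
--         return None
--     try:
--         return (team_id, int(a.get("scoreHome", 0) or 0), int(a.get("scoreAway", 0) or 0))
--     except Exception:
--         return None
--
--
-- def _infer_home_away_from_actions(actions: list[dict]) -> tuple[int, int]:
--     clean = [r for a in actions for r in (_clean_row(a),) if r is not None]
--     home_votes: dict[int, int] = {}
--     away_votes: dict[int, int] = {}
--     for (_pt, ph, pa), (t, h, w) in zip(clean, clean[1:]):
--         if h > ph and w == pa:
--             home_votes[t] = home_votes.get(t, 0) + 1
--         elif w > pa and h == ph:
--             away_votes[t] = away_votes.get(t, 0) + 1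
--     if home_votes and away_votes:
--         home_id = max(home_votes, key=home_votes.get)
--         away_id = max(away_votes, key=away_votes.get)
--         if home_id != away_id:
--             return int(home_id), int(away_id)
--     return 0, 0
-- ===== Notes on version B (the rewrite author's own statement) =====
-- stated objective: alternative
-- what changed: A's single stateful loop carrying prev_home/prev_away across skipped rows is replaced by a two-phase decomposition: one filtering pass builds a cleaned list of (team_id, score_home, score_away) triples, then votes are tallied over zip(clean, clean[1:]) consecutive pairs, keeping the identical max(..., key=d.get) selection.
import Mathlib
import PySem

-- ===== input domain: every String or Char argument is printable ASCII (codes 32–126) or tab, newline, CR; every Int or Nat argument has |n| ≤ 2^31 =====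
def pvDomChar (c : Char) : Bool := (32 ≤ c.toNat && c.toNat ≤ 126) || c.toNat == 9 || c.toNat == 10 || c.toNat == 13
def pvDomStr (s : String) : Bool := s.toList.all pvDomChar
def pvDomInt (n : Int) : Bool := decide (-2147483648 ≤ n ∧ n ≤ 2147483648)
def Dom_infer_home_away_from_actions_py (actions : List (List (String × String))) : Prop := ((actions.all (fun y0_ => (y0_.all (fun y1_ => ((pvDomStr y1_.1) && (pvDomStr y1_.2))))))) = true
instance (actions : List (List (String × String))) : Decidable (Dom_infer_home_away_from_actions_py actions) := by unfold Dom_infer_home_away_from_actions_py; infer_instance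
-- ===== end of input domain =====

-- B replaces A's single stateful loop (prev_home/prev_away carried across skips) by a clean
-- filter pass followed by a vote pass over consecutive pairs; objective: alternative decomposition (not faster).

-- shared helpers: both Pythons contain these identical parse lines / final selection
-- int(a.get("teamId", 0) or 0), with exceptions mapped to 0 (A's `except: team_id = 0`)
def pvTeamId (a : List (String × String)) : Int :=
  match (PySem.Dict.mk a).get? "teamId" with
  | none => 0
  | some s => if s = "" then 0 else (PySem.Int.ofStr? s).getD 0

-- int(a.get(k, 0) or 0); none = the ValueError branch
def pvScore? (a : List (String × String)) (k : String) : Option Int :=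
  match (PySem.Dict.mk a).get? k with
  | none => some 0
  | some s => if s = "" then some 0 else PySem.Int.ofStr? s

-- the final selection (identical tail of both Pythons): max(d, key=d.get) twice, guard home≠away
def pvPick (hv av : PySem.Dict Int Int) : Int × Int :=
  if hv.size ≠ 0 ∧ av.size ≠ 0 then
    match PySem.List.max? hv.keys (fun k => hv.getD k 0),
          PySem.List.max? av.keys (fun k => av.getD k 0) with
    | some hi, some ai => if hi ≠ ai then (hi, ai) else (0, 0)
    | _, _ => (0, 0)
  else (0, 0)

-- ===== PORT A =====
-- A's loop body: one action updates (home_votes, away_votes, prev)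
def pvStepA (st : PySem.Dict Int Int × PySem.Dict Int Int × Option (Int × Int))
    (a : List (String × String)) :
    PySem.Dict Int Int × PySem.Dict Int Int × Option (Int × Int) :=
  let t := pvTeamId a
  if t ≤ 0 then st
  else
    match pvScore? a "scoreHome", pvScore? a "scoreAway" with
    | some h, some w =>
      match st.2.2 with
      | some (ph, pa) =>
        if h > ph ∧ w = pa then (st.1.modify t 0 (· + 1), st.2.1, some (h, w))
        else if w > pa ∧ h = ph then (st.1, st.2.1.modify t 0 (· + 1), some (h, w))
        else (st.1, st.2.1, some (h, w))
      | none => (st.1, st.2.1, some (h, w))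
    | _, _ => st

def infer_home_away_from_actions_py (actions : List (List (String × String))) : Int × Int :=
  let st := actions.foldl pvStepA (PySem.Dict.empty, PySem.Dict.empty, none)
  pvPick st.1 st.2.1

-- ===== PORT B =====
-- Source B's _clean_row
def pvCleanRow? (a : List (String × String)) : Option (Int × Int × Int) :=
  let t := pvTeamId a
  if t ≤ 0 then none
  else
    match pvScore? a "scoreHome", pvScore? a "scoreAway" with
    | some h, some w => some (t, h, w)
    | _, _ => none

-- Source B's vote over one consecutive pair ((_pt, ph, pa), (t, h, w)); ignores the previous team id
def pvVote (st : PySem.Dict Int Int × PySem.Dict Int Int)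
    (p : (Int × Int × Int) × (Int × Int × Int)) :
    PySem.Dict Int Int × PySem.Dict Int Int :=
  let ph := p.1.2.1; let pa := p.1.2.2
  let t := p.2.1; let h := p.2.2.1; let w := p.2.2.2
  if h > ph ∧ w = pa then (st.1.modify t 0 (· + 1), st.2)
  else if w > pa ∧ h = ph then (st.1, st.2.modify t 0 (· + 1))
  else st

def infer_home_away_from_actions_py_alt (actions : List (List (String × String))) : Int × Int :=
  let clean := actions.filterMap pvCleanRow?
  let v := (clean.zip (clean.drop 1)).foldl pvVote (PySem.Dict.empty, PySem.Dict.empty)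
  pvPick v.1 v.2

-- ===== PRECONDITION & SPEC =====
def Spec_infer_home_away_from_actions_py (actions : List (List (String × String))) (out : Int × Int) : Prop := out = infer_home_away_from_actions_py_alt actions
instance (actions : List (List (String × String))) (out : Int × Int) : Decidable (Spec_infer_home_away_from_actions_py actions out) := by unfold Spec_infer_home_away_from_actions_py; infer_instance

-- ===== CLAIM (what is proved, stated in full; the proofs are below) =====
def Claim_equal_infer_home_away_from_actions_py : Prop := ∀ (actions : List (List (String × String))), Dom_infer_home_away_from_actions_py actions → Spec_infer_home_away_from_actions_py actions (infer_home_away_from_actions_py actions)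

-- ===== LEMMAS AND PROOFS =====

-- the pair list B votes over, with an optional seed for A's carried prev scores
def pvSeed (p : Option (Int × Int)) (c : List (Int × Int × Int)) : List (Int × Int × Int) :=
  match p with
  | none => c
  | some (ph, pa) => (0, ph, pa) :: c

def pvPairs (p : Option (Int × Int)) (c : List (Int × Int × Int)) :
    List ((Int × Int × Int) × (Int × Int × Int)) :=
  (pvSeed p c).zip ((pvSeed p c).drop 1)

def pvPrevOf (p : Option (Int × Int)) (c : List (Int × Int × Int)) : Option (Int × Int) :=
  match c.getLast? with
  | some x => some (x.2.1, x.2.2)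
  | none => p

lemma pvStepA_char (st : PySem.Dict Int Int × PySem.Dict Int Int × Option (Int × Int))
    (a : List (String × String)) :
    pvStepA st a =
      match pvCleanRow? a with
      | none => st
      | some (t, h, w) =>
        match st.2.2 with
        | some (ph, pa) =>
          if h > ph ∧ w = pa then (st.1.modify t 0 (· + 1), st.2.1, some (h, w))
          else if w > pa ∧ h = ph then (st.1, st.2.1.modify t 0 (· + 1), some (h, w))
          else (st.1, st.2.1, some (h, w))
        | none => (st.1, st.2.1, some (h, w)) := by
  unfold pvStepA pvCleanRow?
  by_cases ht : pvTeamId a ≤ 0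
  · simp [ht]
  · simp only [ht, if_false]
    cases pvScore? a "scoreHome" <;> cases pvScore? a "scoreAway" <;> rfl

lemma pvStepA_none (a : List (String × String))
    (st : PySem.Dict Int Int × PySem.Dict Int Int × Option (Int × Int))
    (hc : pvCleanRow? a = none) : pvStepA st a = st := by
  rw [pvStepA_char, hc]

lemma pvStepA_some_none (a : List (String × String)) (hv av : PySem.Dict Int Int)
    (t h w : Int) (hc : pvCleanRow? a = some (t, h, w)) :
    pvStepA (hv, av, none) a = (hv, av, some (h, w)) := by
  rw [pvStepA_char, hc]

lemma pvStepA_some_some (a : List (String × String)) (hv av : PySem.Dict Int Int)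
    (ph pa t h w : Int) (hc : pvCleanRow? a = some (t, h, w)) :
    pvStepA (hv, av, some (ph, pa)) a =
      if h > ph ∧ w = pa then (hv.modify t 0 (· + 1), av, some (h, w))
      else if w > pa ∧ h = ph then (hv, av.modify t 0 (· + 1), some (h, w))
      else (hv, av, some (h, w)) := by
  rw [pvStepA_char, hc]

-- the head's previous-team component is never read by pvVote
lemma pvPairs_shift (t h w : Int) (c : List (Int × Int × Int))
    (st : PySem.Dict Int Int × PySem.Dict Int Int) :
    (pvPairs none ((t, h, w) :: c)).foldl pvVote st =
    (pvPairs (some (h, w)) c).foldl pvVote st := by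
  cases c with
  | nil => rfl
  | cons y ys => rfl

lemma pvPairs_cons (ph pa t h w : Int) (c : List (Int × Int × Int))
    (st : PySem.Dict Int Int × PySem.Dict Int Int) :
    (pvPairs (some (ph, pa)) ((t, h, w) :: c)).foldl pvVote st =
    (pvPairs (some (h, w)) c).foldl pvVote (pvVote st ((0, ph, pa), (t, h, w))) := by
  cases c with
  | nil => rfl
  | cons y ys => rfl

lemma pvVote_eq (st : PySem.Dict Int Int × PySem.Dict Int Int) (pt ph pa t h w : Int) :
    pvVote st ((pt, ph, pa), (t, h, w)) =
      if h > ph ∧ w = pa then (st.1.modify t 0 (· + 1), st.2)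
      else if w > pa ∧ h = ph then (st.1, st.2.modify t 0 (· + 1))
      else st := rfl

lemma pvLoopA (acts : List (List (String × String)))
    (hv av : PySem.Dict Int Int) (p : Option (Int × Int)) :
    acts.foldl pvStepA (hv, av, p) =
      (((pvPairs p (acts.filterMap pvCleanRow?)).foldl pvVote (hv, av)).1,
       ((pvPairs p (acts.filterMap pvCleanRow?)).foldl pvVote (hv, av)).2,
       pvPrevOf p (acts.filterMap pvCleanRow?)) := by
  induction acts generalizing hv av p with
  | nil =>
    cases p with
    | none => rfl
    | some q => rfl
  | cons a rest ih =>
    rw [List.foldl_cons]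
    cases hc : pvCleanRow? a with
    | none =>
      cases p with
      | none => rw [pvStepA_none a _ hc]; simp only [List.filterMap_cons, hc, ih]
      | some q => obtain ⟨ph, pa⟩ := q; rw [pvStepA_none a _ hc]; simp only [List.filterMap_cons, hc, ih]
    | some r =>
      obtain ⟨t, h, w⟩ := r
      simp only [List.filterMap_cons, hc]
      cases p with
      | none =>
        rw [pvStepA_some_none a hv av t h w hc]
        have hprev0 : pvPrevOf (none : Option (Int × Int)) ((t, h, w) :: rest.filterMap pvCleanRow?) =
            pvPrevOf (some (h, w)) (rest.filterMap pvCleanRow?) := by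
          cases hl : (rest.filterMap pvCleanRow?).getLast? <;>
            simp [pvPrevOf, List.getLast?_cons, hl]
        have hp := pvPairs_shift t h w (rest.filterMap pvCleanRow?) (hv, av)
        rw [ih, hprev0, hp]
      | some q =>
        obtain ⟨ph, pa⟩ := q
        rw [pvStepA_some_some a hv av ph pa t h w hc]
        have hprev : pvPrevOf (some (ph, pa)) ((t, h, w) :: rest.filterMap pvCleanRow?) =
            pvPrevOf (some (h, w)) (rest.filterMap pvCleanRow?) := by
          cases hl : (rest.filterMap pvCleanRow?).getLast? <;>
            simp [pvPrevOf, List.getLast?_cons, hl]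
        rw [pvPairs_cons, hprev, pvVote_eq]
        by_cases h1 : h > ph ∧ w = pa
        · rw [if_pos h1, if_pos h1, ih]
        · rw [if_neg h1, if_neg h1]
          by_cases h2 : w > pa ∧ h = ph
          · rw [if_pos h2, if_pos h2, ih]
          · rw [if_neg h2, if_neg h2, ih]

-- ===== VERDICT (by name: the statement is the Claim_ definition above) =====
theorem infer_home_away_from_actions_py_spec : Claim_equal_infer_home_away_from_actions_py := by
  intro actions _
  unfold Spec_infer_home_away_from_actions_py infer_home_away_from_actions_py
    infer_home_away_from_actions_py_alt
  rw [pvLoopA]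
  rfl
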